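-- pv_equiv track=rewrite | github.com/LVala/agh-cs | data_structures_and_algorithms/kolosy/1 kolos/liczby_ładniejsze.py | is_prettier
-- ===== SOURCE A (Python) =====
-- def is_prettier(a, b):
--     tab_a = [0]*10
--     tab_b = [0]*10
--     j_a, w_a, j_b, w_b = 0, 0, 0, 0
--
--     while a > 0:
--         r = a % 10
--         if tab_a[r] == 0:
--             tab_a[r] += 1
--             j_a += 1
--         elif tab_a[r] == 1:
--             tab_a[r] += 1
--             j_a -= 1
--             w_a += 1
--         a //= 10
--     while b > 0:
--         r = b % 10
--         if tab_b[r] == 0: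
--             tab_b[r] += 1
--             j_b += 1
--         elif tab_b[r] == 1:
--             tab_b[r] += 1
--             j_b -= 1
--             w_b += 1
--         b //= 10
--
--     if j_a > j_b: return True
--     if j_a == j_b and w_a <= w_b: return True
--     return False
-- ===== SOURCE B (Python) =====
-- def is_prettier(a, b):
--     def digits(n):
--         ds = []
--         while n > 0:
--             ds.append(n % 10)
--             n //= 10
--         return ds
--
--     def run_len(d, xs):
--         i = 0
--         while i < len(xs) and xs[i] == d:
--             i += 1
--         return i
--
--     def tally(ds):
--         # ds is sorted, so equal digits are contiguous: classify one run per call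
--         if not ds:
--             return (0, 0)
--         k = run_len(ds[0], ds[1:])
--         j, w = tally(ds[k + 1:])
--         return (j + 1, w) if k == 0 else (j, w + 1)
--
--     ja, wa = tally(sorted(digits(a)))
--     jb, wb = tally(sorted(digits(b)))
--     return ja > jb or (ja == jb and wa <= wb)
-- ===== Notes on version B (the rewrite author's own statement) =====
-- stated objective: alternative
-- what changed: A classifies digits by direct-address counting into a fixed 10-slot occurrence table, maintaining the unique/repeated tallies inline in the extraction loop; B uses no table at all: it extracts the digit list, sorts it, and recursively scans the sorted list run by run, classifying each run by its length (1 = unique, >1 = repeated) before applying the same final comparison.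
import Mathlib
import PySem

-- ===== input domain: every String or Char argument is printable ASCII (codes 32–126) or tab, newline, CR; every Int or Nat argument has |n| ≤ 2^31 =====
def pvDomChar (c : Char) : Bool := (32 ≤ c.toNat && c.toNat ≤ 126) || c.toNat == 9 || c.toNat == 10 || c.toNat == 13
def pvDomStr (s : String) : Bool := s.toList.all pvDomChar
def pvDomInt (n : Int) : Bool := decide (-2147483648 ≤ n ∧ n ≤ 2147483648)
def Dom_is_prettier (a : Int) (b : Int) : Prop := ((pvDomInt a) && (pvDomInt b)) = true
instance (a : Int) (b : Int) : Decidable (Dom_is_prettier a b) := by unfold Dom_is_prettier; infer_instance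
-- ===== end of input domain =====

-- B replaces A's direct-address counting (a fixed 10-slot occurrence table with inline
-- unique/repeated tallies) by sort-then-run-scan: extract the digit list, sort it, and
-- recursively classify each maximal run by its length. Objective: alternative. Both total.

-- ===== PORT A =====
-- the while-loop of A: extracts digits of n, maintaining tab (counts capped at 2), j, w
def pvLoopA (n : Int) (tab : List Int) (j w : Int) : Int × Int :=
  if h : n > 0 then
    let r := PySem.Int.mod n 10
    let v := PySem.List.pyGetD tab r 0       -- tab[r]; r ∈ [0,10) so always in range
    if v = 0 then
      pvLoopA (PySem.Int.floordiv n 10) (PySem.List.pySetD tab r (v + 1)) (j + 1) w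
    else if v = 1 then
      pvLoopA (PySem.Int.floordiv n 10) (PySem.List.pySetD tab r (v + 1)) (j - 1) (w + 1)
    else
      pvLoopA (PySem.Int.floordiv n 10) tab j w
  else (j, w)
termination_by n.toNat
decreasing_by
  all_goals
    rw [PySem.Int.floordiv_eq_ediv_of_pos (by norm_num)]
    omega

def is_prettier (a : Int) (b : Int) : Bool :=
  let pa := pvLoopA a (List.replicate 10 0) 0 0
  let pb := pvLoopA b (List.replicate 10 0) 0 0
  if pa.1 > pb.1 then true
  else if pa.1 = pb.1 ∧ pa.2 ≤ pb.2 then true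
  else false

-- ===== PORT B =====
-- B's digits loop: ds.append(n % 10); n //= 10
def pvDigitsB (n : Int) : List Int :=
  if _h : n > 0 then PySem.Int.mod n 10 :: pvDigitsB (PySem.Int.floordiv n 10) else []
termination_by n.toNat
decreasing_by
  rw [PySem.Int.floordiv_eq_ediv_of_pos (by norm_num)]
  omega

-- B's run_len: length of the leading prefix of xs equal to d
def pvRunLen (d : Int) : List Int → Nat
  | [] => 0
  | x :: xs => if x = d then pvRunLen d xs + 1 else 0

-- B's tally: one maximal run of the sorted list per recursive call
def pvTally (ds : List Int) : Int × Int :=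
  match ds with
  | [] => (0, 0)
  | d :: rest =>
    let k := pvRunLen d rest
    let p := pvTally (rest.drop k)
    if k = 0 then (p.1 + 1, p.2) else (p.1, p.2 + 1)
termination_by ds.length
decreasing_by simp only [List.length_cons, List.length_drop]; omega

def is_prettier_alt (a : Int) (b : Int) : Bool :=
  let pa := pvTally (PySem.List.sorted (pvDigitsB a) (fun x => x) false)
  let pb := pvTally (PySem.List.sorted (pvDigitsB b) (fun x => x) false)
  decide (pa.1 > pb.1) || (decide (pa.1 = pb.1) && decide (pa.2 ≤ pb.2))

-- ===== PRECONDITION & SPEC =====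
def Spec_is_prettier (a : Int) (b : Int) (out : Bool) : Prop := out = is_prettier_alt a b
instance (a : Int) (b : Int) (out : Bool) : Decidable (Spec_is_prettier a b out) := by unfold Spec_is_prettier; infer_instance

-- ===== CLAIM (what is proved, stated in full; the proofs are below) =====
def Claim_equal_is_prettier : Prop := ∀ (a : Int) (b : Int), Dom_is_prettier a b → Spec_is_prettier a b (is_prettier a b)

-- ===== LEMMAS AND PROOFS =====

-- reference tallies: over r ∈ 0..9, digits of count 1 and of count ≥ 2 in a digit list
def pvJ (ds : List Int) : Nat := (List.range 10).countP (fun r : Nat => decide (ds.count ((r : Int)) = 1))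
def pvW (ds : List Int) : Nat := (List.range 10).countP (fun r : Nat => decide (2 ≤ ds.count ((r : Int))))

lemma pvDigitsB_bound (n : Int) : ∀ x ∈ pvDigitsB n, 0 ≤ x ∧ x < 10 := by
  intro x hx
  rw [pvDigitsB] at hx
  by_cases h : n > 0
  · simp only [dif_pos h, List.mem_cons] at hx
    rcases hx with h' | h'
    · subst h'
      exact ⟨PySem.Int.mod_nonneg n (by norm_num), PySem.Int.mod_lt n (by norm_num)⟩
    · exact pvDigitsB_bound _ x h'
  · simp [dif_neg h] at hx
termination_by n.toNat
decreasing_by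
  rw [PySem.Int.floordiv_eq_ediv_of_pos (by norm_num)]
  omega

-- countP over a nodup list where two predicates differ only at one member i
lemma pv_countP_agree (L : List Nat) (p q : Nat → Bool) (i : Nat)
    (hnd : L.Nodup) (hi : i ∈ L) (h : ∀ j ∈ L, j ≠ i → p j = q j) :
    L.countP p + (if q i then 1 else 0) = L.countP q + (if p i then 1 else 0) := by
  induction L with
  | nil => simp at hi
  | cons a as ih =>
    rcases List.nodup_cons.mp hnd with ⟨hna, hnd'⟩
    simp only [List.countP_cons]
    by_cases hai : a = i
    · subst hai
      have : as.countP p = as.countP q :=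
        List.countP_congr (fun j hj => by
          rw [h j (List.mem_cons_of_mem _ hj) (fun hji => hna (hji ▸ hj))])
      rw [this]
      split_ifs <;> omega
    · have hi' : i ∈ as := by
        rcases List.mem_cons.mp hi with h' | h'
        · exact absurd h'.symm hai
        · exact h'
      have hpa : p a = q a := h a List.mem_cons_self hai
      have := ih hnd' hi' (fun j hj => h j (List.mem_cons_of_mem _ hj))
      rw [hpa]
      split_ifs at this ⊢ <;> omega

-- pvRunLen: the prefix it measures is constant d, and the next element (if any) differs
lemma pvRunLen_take (d : Int) (xs : List Int) :
    xs.take (pvRunLen d xs) = List.replicate (pvRunLen d xs) d := by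
  induction xs with
  | nil => simp [pvRunLen]
  | cons x t ih =>
    rw [pvRunLen]
    by_cases hx : x = d
    · subst hx
      simp [List.replicate_succ, ih]
    · simp [if_neg hx]

lemma pvRunLen_stop (d : Int) (xs : List Int) (y : Int) (t : List Int)
    (h : xs.drop (pvRunLen d xs) = y :: t) : y ≠ d := by
  induction xs generalizing y t with
  | nil => simp [pvRunLen] at h
  | cons x rest ih =>
    rw [pvRunLen] at h
    by_cases hx : x = d
    · rw [if_pos hx, List.drop_succ_cons] at h
      exact ih _ _ h
    · rw [if_neg hx, List.drop_zero] at h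
      cases h
      exact hx

lemma pvTally_spec (ds : List Int) (hs : ds.Pairwise (· ≤ ·))
    (hb : ∀ x ∈ ds, 0 ≤ x ∧ x < 10) :
    pvTally ds = ((pvJ ds : Int), (pvW ds : Int)) := by
  match ds with
  | [] =>
    simp [pvTally, pvJ, pvW]
  | d :: rest =>
    rw [pvTally]
    set k := pvRunLen d rest with hk
    set tail := rest.drop k with htail
    -- tail is sorted and bounded
    have hrest : rest.Pairwise (· ≤ ·) := (List.pairwise_cons.mp hs).2
    have hdle : ∀ x ∈ rest, d ≤ x := (List.pairwise_cons.mp hs).1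
    have htsub : tail.Sublist rest := htail ▸ List.drop_sublist k rest
    have hts : tail.Pairwise (· ≤ ·) := hrest.sublist htsub
    have htb : ∀ x ∈ tail, 0 ≤ x ∧ x < 10 := fun x hx =>
      hb x (List.mem_cons_of_mem _ (htsub.subset hx))
    -- every element of tail is > d, hence tail.count d = 0
    have htgt : ∀ x ∈ tail, d < x := by
      cases htl : tail with
      | nil => intro x hx; simp at hx
      | cons y t =>
        intro x hx
        have hy : y ≠ d := pvRunLen_stop d rest y t (by rw [← hk]; exact htail.symm.trans htl)
        have hymem : y ∈ rest := htsub.subset (by rw [htl]; exact List.mem_cons_self)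
        have hyd : d < y := lt_of_le_of_ne (hdle y hymem) (Ne.symm hy)
        rcases List.mem_cons.mp hx with h' | h'
        · omega
        · have hts' := htl ▸ hts
          have := (List.pairwise_cons.mp hts').1 x h'
          omega
    have htc0 : tail.count d = 0 := by
      rw [List.count_eq_zero]
      intro hmem
      exact absurd rfl (ne_of_gt (htgt d hmem))
    -- counts: ds.count d = k + 1, ds.count v = tail.count v for v ≠ d
    have hsplit : rest = List.replicate k d ++ tail := by
      conv_lhs => rw [← List.take_append_drop k rest]
      rw [htail]
      congr 1
      rw [hk]
      exact pvRunLen_take d rest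
    have hcd : (d :: rest).count d = k + 1 := by
      rw [List.count_cons_self, hsplit, List.count_append, List.count_replicate_self, htc0]
    have hcv : ∀ v : Int, v ≠ d → (d :: rest).count v = tail.count v := by
      intro v hv
      rw [hsplit]
      simp only [List.count_cons, List.count_append, List.count_replicate]
      have h2 : ¬ (d = v) := fun hc => hv hc.symm
      simp [h2]
    -- the distinguished index d.toNat
    have hd10 : 0 ≤ d ∧ d < 10 := hb d List.mem_cons_self
    have hdcast : ((d.toNat : Nat) : Int) = d := Int.toNat_of_nonneg hd10.1
    have hdi : d.toNat ∈ List.range 10 := List.mem_range.mpr (by omega)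
    have hagree : ∀ (p q : Nat → Bool), (∀ j : Nat, (j : Int) ≠ d → p j = q j) →
        (List.range 10).countP p + (if q d.toNat then 1 else 0)
          = (List.range 10).countP q + (if p d.toNat then 1 else 0) := by
      intro p q hpq
      exact pv_countP_agree _ p q d.toNat (List.nodup_range) hdi
        (fun j _ hj => hpq j (by
          intro hc
          exact hj (by omega)))
    have hJ := hagree (fun r => decide ((d :: rest).count ((r : Int)) = 1))
      (fun r => decide (tail.count ((r : Int)) = 1))
      (fun j hj => by simp only [hcv _ hj])
    have hW := hagree (fun r => decide (2 ≤ (d :: rest).count ((r : Int))))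
      (fun r => decide (2 ≤ tail.count ((r : Int))))
      (fun j hj => by simp only [hcv _ hj])
    simp only [hdcast, hcd, htc0] at hJ hW
    norm_num at hJ hW
    -- hJ : pvJ-count of ds (+ nothing) = pvJ-count of tail + [k = 0]; likewise hW
    have ih := pvTally_spec tail hts htb
    by_cases hk0 : k = 0
    · rw [if_pos hk0] at hJ
      rw [if_neg (by omega : ¬ (2 ≤ k + 1))] at hW
      rw [if_pos hk0]
      simp only [ih, Prod.mk.injEq]
      unfold pvJ pvW
      constructor <;> omega
    · rw [if_neg hk0] at hJ
      rw [if_pos (by omega : 2 ≤ k + 1)] at hW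
      rw [if_neg hk0]
      simp only [ih, Prod.mk.injEq]
      unfold pvJ pvW
      constructor <;> omega
termination_by ds.length
decreasing_by simp only [List.length_cons, List.length_drop]; omega

-- ===== A-side machinery: A's loop computes the same reference tallies =====
-- increment-fold form of A's table building (proof helper)
def pvIncAll (ds : List Int) (c : List Int) : List Int :=
  ds.foldl (fun c d => PySem.List.pySetD c d (PySem.List.pyGetD c d 0 + 1)) c

def pvT1 (c : List Int) : Nat := c.countP (fun x => decide (x = 1))
def pvT2 (c : List Int) : Nat := c.countP (fun x => decide (2 ≤ x))

lemma pv_countP_set_add (p : Int → Bool) (c : List Int) (r : Nat) (x : Int)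
    (h : r < c.length) :
    (c.set r x).countP p + (if p (c.getD r 0) then 1 else 0)
      = c.countP p + (if p x then 1 else 0) := by
  induction c generalizing r with
  | nil => simp at h
  | cons y ys ih =>
    cases r with
    | zero =>
      simp only [List.set_cons_zero, List.countP_cons, List.getD_cons_zero]
      split_ifs <;> omega
    | succ r' =>
      simp only [List.set_cons_succ, List.countP_cons, List.getD_cons_succ]
      have := ih r' (by simpa using h)
      split_ifs at this ⊢ <;> omega

-- invariant: A's loop on the capped table computes the tally deltas of the count table
lemma pvLoopA_eq (n : Int) (c : List Int) (j w : Int)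
    (hlen : c.length = 10) (hpos : ∀ x ∈ c, 0 ≤ x) :
    pvLoopA n (c.map (fun x => min x 2)) j w
      = (j - (pvT1 c : Int) + (pvT1 (pvIncAll (pvDigitsB n) c) : Int),
         w - (pvT2 c : Int) + (pvT2 (pvIncAll (pvDigitsB n) c) : Int)) := by
  rw [pvLoopA, pvDigitsB]
  by_cases h : n > 0
  · simp only [dif_pos h]
    have hr0 : 0 ≤ PySem.Int.mod n 10 := PySem.Int.mod_nonneg n (by norm_num)
    have hrlt : PySem.Int.mod n 10 < 10 := PySem.Int.mod_lt n (by norm_num)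
    set r : Nat := (PySem.Int.mod n 10).toNat with hrdef
    have hrn : r < c.length := by rw [hlen]; omega
    set v : Int := c.getD r 0 with hvdef
    have hvmem : v ∈ c := by
      rw [hvdef, List.getD_eq_getElem c 0 hrn]
      exact List.getElem_mem hrn
    have hv0 : 0 ≤ v := hpos _ hvmem
    have hget : PySem.List.pyGetD (c.map (fun x => min x 2)) (PySem.Int.mod n 10) 0
        = min v 2 := by
      rw [PySem.List.pyGetD_of_nonneg _ _ hr0, ← hrdef,
        List.getD_eq_getElem _ 0 (by simpa using hrn), List.getElem_map,
        hvdef, List.getD_eq_getElem c 0 hrn]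
    have hgetc : PySem.List.pyGetD c (PySem.Int.mod n 10) 0 = v := by
      rw [PySem.List.pyGetD_of_nonneg _ _ hr0, ← hrdef, hvdef]
    have hsetc : ∀ x : Int, PySem.List.pySetD c (PySem.Int.mod n 10) x = c.set r x := by
      intro x
      rw [PySem.List.pySetD_of_nonneg _ _ hr0, hrdef]
    have hsetm : ∀ x : Int,
        PySem.List.pySetD (c.map (fun x => min x 2)) (PySem.Int.mod n 10) x
          = (c.map (fun x => min x 2)).set r x := by
      intro x
      rw [PySem.List.pySetD_of_nonneg _ _ hr0, hrdef]
    have hInc : pvIncAll (PySem.Int.mod n 10 :: pvDigitsB (PySem.Int.floordiv n 10)) c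
        = pvIncAll (pvDigitsB (PySem.Int.floordiv n 10)) (c.set r (v + 1)) := by
      simp only [pvIncAll, List.foldl_cons, hsetc, hgetc]
    have hlen' : (c.set r (v + 1)).length = 10 := by simpa using hlen
    have hpos' : ∀ x ∈ c.set r (v + 1), 0 ≤ x := by
      intro x hx
      rcases List.mem_or_eq_of_mem_set hx with h' | h'
      · exact hpos _ h'
      · omega
    have ih := pvLoopA_eq (PySem.Int.floordiv n 10) (c.set r (v + 1))
    have ht1 := pv_countP_set_add (fun x => decide (x = 1)) c r (v + 1) hrn
    have ht2 := pv_countP_set_add (fun x => decide (2 ≤ x)) c r (v + 1) hrn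
    rw [← hvdef] at ht1 ht2
    simp only [hget, hsetm, hInc]
    by_cases hc0 : v = 0
    · have : min v 2 = 0 := by omega
      rw [this, if_pos rfl]
      have hms : (c.set r (v + 1)).map (fun x => min x 2)
          = (c.map (fun x => min x 2)).set r (0 + 1) := by
        rw [List.map_set]; congr 1; omega
      simp only [hc0] at ht1 ht2 hms hlen' hpos' ih ⊢
      rw [← hms, ih _ _ hlen' hpos']
      simp only [pvT1, pvT2, Prod.mk.injEq]
      norm_num at ht1 ht2
      constructor <;> push_cast <;> omega
    · by_cases hc1 : v = 1
      · have hm : min v 2 = 1 := by omega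
        rw [hm]
        rw [if_neg (by norm_num), if_pos rfl]
        have hms : (c.set r (v + 1)).map (fun x => min x 2)
            = (c.map (fun x => min x 2)).set r (1 + 1) := by
          rw [List.map_set]; congr 1; omega
        simp only [hc1] at ht1 ht2 hms hlen' hpos' ih ⊢
        rw [← hms, ih _ _ hlen' hpos']
        simp only [pvT1, pvT2, Prod.mk.injEq]
        norm_num at ht1 ht2
        constructor <;> push_cast <;> omega
      · have hv2 : 2 ≤ v := by omega
        have hm : min v 2 = 2 := by omega
        rw [hm, if_neg (by norm_num), if_neg (by norm_num)]
        have hms : (c.set r (v + 1)).map (fun x => min x 2) = c.map (fun x => min x 2) := by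
          rw [List.map_set]
          apply List.ext_getElem (by simp)
          intro i h1 h2
          by_cases hir : i = r
          · subst hir
            rw [List.getElem_set_self (by simpa using hrn), List.getElem_map,
              ← List.getD_eq_getElem c 0 hrn, ← hvdef]
            omega
          · rw [List.getElem_set_ne (by omega)]
        have := ih j w hlen' hpos'
        rw [hms] at this
        rw [this]
        simp only [pvT1, pvT2, Prod.mk.injEq]
        simp only [decide_eq_true_eq] at ht1 ht2
        split_ifs at ht1 ht2 <;> constructor <;> omega
  · simp only [dif_neg h, pvIncAll, List.foldl_nil, Prod.mk.injEq]
    constructor <;> omega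
termination_by n.toNat
decreasing_by
  all_goals
    rw [PySem.Int.floordiv_eq_ediv_of_pos (by norm_num)]
    omega

-- the count table built by pvIncAll over the digits, in closed form
lemma pvIncAll_map_range (ds : List Int) (f : Nat → Int)
    (hb : ∀ x ∈ ds, 0 ≤ x ∧ x < 10) :
    pvIncAll ds ((List.range 10).map f)
      = (List.range 10).map (fun r => f r + (ds.count ((r : Int)) : Int)) := by
  induction ds generalizing f with
  | nil => simp [pvIncAll]
  | cons d t ih =>
    have hd := hb d List.mem_cons_self
    have hdn : d.toNat < 10 := by omega
    have hg : ((List.range 10).map f).getD d.toNat 0 = f d.toNat := by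
      rw [List.getD_eq_getElem _ 0 (by simp; omega)]
      simp
    have hstep : PySem.List.pySetD ((List.range 10).map f) d
        (PySem.List.pyGetD ((List.range 10).map f) d 0 + 1)
        = (List.range 10).map (fun r => f r + (if (r : Int) = d then 1 else 0)) := by
      rw [PySem.List.pyGetD_of_nonneg _ _ hd.1, PySem.List.pySetD_of_nonneg _ _ hd.1, hg]
      apply List.ext_getElem (by simp)
      intro i h1 h2
      simp only [List.length_map, List.length_range] at h2
      simp only [List.getElem_set, List.getElem_map, List.getElem_range]
      by_cases hi : d.toNat = i
      · rw [if_pos hi, if_pos (by omega), ← hi]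
      · rw [if_neg hi, if_neg (show ¬ ((i : Int) = d) by omega)]
        simp
    have ihs := ih (fun r => f r + (if (r : Int) = d then 1 else 0))
      (fun x hx => hb x (List.mem_cons_of_mem _ hx))
    simp only [pvIncAll, List.foldl_cons] at ihs ⊢
    rw [hstep, ihs]
    apply List.map_congr_left
    intro r _
    by_cases hrd : (r : Int) = d
    · rw [if_pos hrd, hrd, List.count_cons_self]
      push_cast
      ring
    · rw [if_neg hrd]
      have h2 : ¬ (d = (r : Int)) := fun hc => hrd hc.symm
      simp [h2]

-- A's loop from the initial state yields the reference tallies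
lemma pvLoopA_counts (n : Int) :
    pvLoopA n (List.replicate 10 0) 0 0 = ((pvJ (pvDigitsB n) : Int), (pvW (pvDigitsB n) : Int)) := by
  have hrep : (List.range 10).map (fun _ : Nat => (0 : Int)) = List.replicate 10 0 := by decide
  have h := pvLoopA_eq n ((List.range 10).map (fun _ => (0 : Int))) 0 0 (by simp)
    (by intro x hx; simp at hx; omega)
  have hmap : ((List.range 10).map (fun _ : Nat => (0 : Int))).map (fun x => min x 2)
      = List.replicate 10 0 := by decide
  have h1 : pvT1 ((List.range 10).map (fun _ : Nat => (0 : Int))) = 0 := by decide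
  have h2 : pvT2 ((List.range 10).map (fun _ : Nat => (0 : Int))) = 0 := by decide
  rw [hmap, h1, h2, pvIncAll_map_range _ _ (pvDigitsB_bound n)] at h
  simp only [zero_add] at h
  have hT1 : ∀ ds : List Int,
      pvT1 ((List.range 10).map (fun r : Nat => ((ds.count ((r : Int))) : Int))) = pvJ ds := by
    intro ds
    rw [pvT1, List.countP_map, pvJ]
    apply List.countP_congr
    intro r _
    simp only [Function.comp_apply, decide_eq_true_eq]
    omega
  have hT2 : ∀ ds : List Int,
      pvT2 ((List.range 10).map (fun r : Nat => ((ds.count ((r : Int))) : Int))) = pvW ds := by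
    intro ds
    rw [pvT2, List.countP_map, pvW]
    apply List.countP_congr
    intro r _
    simp only [Function.comp_apply, decide_eq_true_eq]
    omega
  rw [h, hT1, hT2]
  norm_num

-- B's sorted-run tally yields the same reference tallies
lemma pvTally_counts (n : Int) :
    pvTally (PySem.List.sorted (pvDigitsB n) (fun x => x) false)
      = ((pvJ (pvDigitsB n) : Int), (pvW (pvDigitsB n) : Int)) := by
  have hperm : (PySem.List.sorted (pvDigitsB n) (fun x => x) false).Perm (pvDigitsB n) :=
    PySem.List.sorted_perm _ _ _
  have hpw : (PySem.List.sorted (pvDigitsB n) (fun x => x) false).Pairwise (· ≤ ·) := by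
    have := PySem.List.sorted_pairwise (pvDigitsB n) (fun x : Int => x)
    simpa using this
  have hb : ∀ x ∈ PySem.List.sorted (pvDigitsB n) (fun x => x) false, 0 ≤ x ∧ x < 10 :=
    fun x hx => pvDigitsB_bound n x (hperm.mem_iff.mp hx)
  rw [pvTally_spec _ hpw hb]
  have hJ : pvJ (PySem.List.sorted (pvDigitsB n) (fun x => x) false) = pvJ (pvDigitsB n) := by
    unfold pvJ
    apply List.countP_congr
    intro r _
    rw [hperm.count_eq]
  have hW : pvW (PySem.List.sorted (pvDigitsB n) (fun x => x) false) = pvW (pvDigitsB n) := by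
    unfold pvW
    apply List.countP_congr
    intro r _
    rw [hperm.count_eq]
  rw [hJ, hW]

-- ===== VERDICT (by name: the statement is the Claim_ definition above) =====
theorem is_prettier_spec : Claim_equal_is_prettier := by
  intro a b _
  unfold Spec_is_prettier is_prettier is_prettier_alt
  simp only [pvLoopA_counts, pvTally_counts]
  split_ifs with h1 h2 <;> simp_all
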